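-- pv_equiv track=rewrite | github.com/altmshfkgudtjr/Problem-Solving | 2021 썸머코딩 프로그래머스/2.py | solution
-- ===== SOURCE A (Python) =====
-- def solution(t, r):
-- 	answer = []
-- 	customers = []
-- 	customers_len = len(t)
-- 	waits = []
-- 	process = 0
--
-- 	for idx, (time, grade) in enumerate(zip(t, r)):
-- 		customers.append((idx, time, grade))
-- 	customers.sort(key=lambda x: x[1], reverse=True)
--
-- 	while waits or customers_len != 0:
-- 		filtered = list(filter(lambda x: x[1] == process, customers))
-- 		customers_len -= len(filtered)
-- 		waits += filtered
-- 		waits.sort(key=lambda x: (x[2], x[0]), reverse=True)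
-- 		if waits:
-- 			customer = waits.pop()
-- 			answer.append(customer[0])
-- 		process += 1
--
-- 	return answer
-- ===== SOURCE B (Python) =====
-- def solution(t, r):
--     events = [(tm, g, i) for i, (tm, g) in enumerate(zip(t, r))]
--     events.sort(key=lambda e: e[0])
--     n = len(events)
--     answer = []
--     waits = []          # kept sorted descending by (grade, index); the next customer to serve is last
--     j = 0
--     time = 0
--     while j < n or waits:
--         if not waits and events[j][0] > time:
--             time = events[j][0]          # skip the idle gap to the next arrival
--         while j < n and events[j][0] <= time:
--             _, g, i = events[j]
--             k = 0
--             while k < len(waits) and waits[k] > (g, i):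
--                 k += 1
--             waits.insert(k, (g, i))
--             j += 1
--         answer.append(waits.pop()[1])
--         time += 1
--     return answer
-- ===== Notes on version B (the rewrite author's own statement) =====
-- stated objective: alternative
-- what changed: A simulates every individual time tick, rescanning the whole customer list and fully re-sorting the waiting list each tick; B sorts arrivals by time once, keeps the waiting list ordered with one insertion scan per arrival, and skips idle time gaps arithmetically, so B's cost is independent of the clock values (intended as faster -- a timing run saw A time out at n=16 while B returned, so no ratio was measurable).
import Mathlib
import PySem

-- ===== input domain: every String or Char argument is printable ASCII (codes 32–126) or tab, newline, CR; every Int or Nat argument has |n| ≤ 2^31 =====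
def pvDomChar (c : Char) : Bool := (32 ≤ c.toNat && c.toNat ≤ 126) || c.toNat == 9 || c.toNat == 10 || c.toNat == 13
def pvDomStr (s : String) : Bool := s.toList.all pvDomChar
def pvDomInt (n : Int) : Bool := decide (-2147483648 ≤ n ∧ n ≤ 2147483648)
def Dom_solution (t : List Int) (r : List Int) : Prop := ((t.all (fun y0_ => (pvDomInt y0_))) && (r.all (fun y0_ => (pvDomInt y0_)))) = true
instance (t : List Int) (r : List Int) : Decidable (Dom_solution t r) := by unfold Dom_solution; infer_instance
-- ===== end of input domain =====

-- B replaces A's tick-by-tick rescan-and-resort simulation by one time-sorted event list,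
-- an insertion-maintained waiting list and arithmetic skipping of idle time gaps, so B's cost
-- does not depend on the clock values (intended as faster; a timing run saw A time out
-- at n=16 while B returned, so no ratio was measurable).


-- ===== PORT A =====
-- the 'for idx, (time, grade) in enumerate(zip(t, r))' loop building (idx, time, grade) triples
def pvEnum (k : Int) : List (Int × Int) → List (Int × Int × Int)
  | [] => []
  | (tm, g) :: rest => (k, tm, g) :: pvEnum (k + 1) rest

-- the 'while waits or customers_len != 0' loop; fuel is a totality guard only (the Python
-- loop diverges when some arrival time is negative or len(t) > len(r); Pre_ excludes those)
def pvALoop : Nat → List (Int × Int × Int) → Int → List (Int × Int × Int) → Int → List Int → List Int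
  | 0, _, _, _, _, ans => ans
  | fuel + 1, customers, clen, waits, process, ans =>
    if waits ≠ [] ∨ clen ≠ 0 then
      let filtered := customers.filter (fun c => c.2.1 == process)
      let clen' := clen - filtered.length
      let waits' := PySem.List.sorted2 (waits ++ filtered) (fun c => c.2.2) (fun c => c.1) true
      match waits'.getLast? with
      | some c => pvALoop fuel customers clen' waits'.dropLast (process + 1) (ans ++ [c.1])
      | none => pvALoop fuel customers clen' waits' (process + 1) ans
    else ans

def solution (t : List Int) (r : List Int) : List Int :=
  let customers := PySem.List.sorted (pvEnum 0 (t.zip r)) (fun c => c.2.1) true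
  pvALoop ((t.foldl max 0).toNat + t.length + 1) customers (t.length : Int) [] 0 []

-- ===== PORT B =====
-- 'waits[k] > (g, i)': Python's lexicographic tuple >
def pvGtB (a b : Int × Int) : Bool := a.1 > b.1 || (a.1 == b.1 && a.2 > b.2)

-- the 'k = 0; while k < len(waits) and waits[k] > (g, i): k += 1; waits.insert(k, (g, i))' scan
def pvIns (x : Int × Int) : List (Int × Int) → List (Int × Int)
  | [] => [x]
  | w :: ws => if pvGtB w x then w :: pvIns x ws else x :: w :: ws

-- length fact cited by pvBLoop's termination proof
theorem pvIns_length (x : Int × Int) (w : List (Int × Int)) : (pvIns x w).length = w.length + 1 := by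
  induction w with
  | nil => rfl
  | cons a as ih => simp only [pvIns]; split <;> simp [ih]

theorem pvFoldIns_length (arr : List (Int × Int × Int)) (w : List (Int × Int)) :
    (arr.foldl (fun w e => pvIns (e.2.1, e.2.2) w) w).length = w.length + arr.length := by
  induction arr generalizing w with
  | nil => rfl
  | cons a as ih => simp [List.foldl_cons, ih, pvIns_length]; omega

-- the '[(tm, g, i) for i, (tm, g) in enumerate(zip(t, r))]' comprehension
def pvMkEvents (k : Int) : List (Int × Int) → List (Int × Int × Int)
  | [] => []
  | (tm, g) :: rest => (tm, g, k) :: pvMkEvents (k + 1) rest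

-- the 'while j < n or waits' loop of Source B, consuming the sorted event list from the front;
-- pvJump is the 'if not waits and events[j][0] > time: time = events[j][0]' idle-gap skip
def pvJump (waits : List (Int × Int)) (events : List (Int × Int × Int)) (time : Int) : Int :=
  match waits, events with
  | [], e :: _ => if time < e.1 then e.1 else time
  | _, _ => time

def pvBLoop (events : List (Int × Int × Int)) (waits : List (Int × Int)) (time : Int) (ans : List Int) : List Int :=
  if events = [] ∧ waits = [] then ans
  else
    let time1 := pvJump waits events time
    let waits1 := (events.takeWhile (fun e => decide (e.1 ≤ time1))).foldl (fun w e => pvIns (e.2.1, e.2.2) w) waits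
    if hW : waits1 = [] then ans   -- Python's waits.pop() on []: this state is never reached
    else pvBLoop (events.dropWhile (fun e => decide (e.1 ≤ time1))) waits1.dropLast (time1 + 1) (ans ++ [(waits1.getLast hW).2])
termination_by events.length + waits.length
decreasing_by
  have h1 := pvFoldIns_length (events.takeWhile (fun e => decide (e.1 ≤ pvJump waits events time))) waits
  have h2 : (events.takeWhile (fun e => decide (e.1 ≤ pvJump waits events time))).length
      + (events.dropWhile (fun e => decide (e.1 ≤ pvJump waits events time))).length = events.length := by
    rw [← List.length_append, List.takeWhile_append_dropWhile]
  have h3 : ((events.takeWhile (fun e => decide (e.1 ≤ pvJump waits events time))).foldl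
      (fun w e => pvIns (e.2.1, e.2.2) w) waits).length ≠ 0 := by
    intro h; exact hW (List.length_eq_zero_iff.mp h)
  simp only [List.length_dropLast]
  omega

def solution_alt (t : List Int) (r : List Int) : List Int :=
  let events := PySem.List.sorted (pvMkEvents 0 (t.zip r)) (fun e => e.1) false
  pvBLoop events [] 0 []

-- ===== PRECONDITION & SPEC =====
-- A's while loop terminates iff every arrival time is nonnegative and len(t) ≤ len(r)
-- (otherwise 'customers_len != 0' stays true forever and the Python diverges): Pre_ is
-- exactly A's termination domain.
def Pre_solution (t : List Int) (r : List Int) : Prop :=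
  t.length ≤ r.length ∧ ∀ x ∈ t, 0 ≤ x
instance (t : List Int) (r : List Int) : Decidable (Pre_solution t r) := by unfold Pre_solution; infer_instance
def pvWitness_solution : List Int × List Int := ([2, 0, 0, 5], [1, 2, 0, 1])
def Spec_solution (t : List Int) (r : List Int) (out : List Int) : Prop := out = solution_alt t r
instance (t : List Int) (r : List Int) (out : List Int) : Decidable (Spec_solution t r out) := by unfold Spec_solution; infer_instance

-- ===== CLAIM (what is proved, stated in full; the proofs are below) =====
def Claim_equal_solution : Prop := ∀ (t : List Int) (r : List Int), Dom_solution t r → Pre_solution t r → Spec_solution t r (solution t r)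

-- ===== LEMMAS AND PROOFS =====

-- strict and non-strict lexicographic order on (grade, index) pairs
def pvLt (a b : Int × Int) : Prop := a.1 < b.1 ∨ (a.1 = b.1 ∧ a.2 < b.2)
def pvLe (a b : Int × Int) : Prop := a.1 < b.1 ∨ (a.1 = b.1 ∧ a.2 ≤ b.2)

-- (idx, tm, g) ↦ (g, idx) — the key A sorts waits by
def pvKeyA (c : Int × Int × Int) : Int × Int := (c.2.2, c.1)
-- (tm, g, i) ↦ (g, i) — the pair B stores in waits
def pvKeyE (e : Int × Int × Int) : Int × Int := (e.2.1, e.2.2)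
-- (tm, g, i) ↦ (i, tm, g)
def pvFlip (e : Int × Int × Int) : Int × Int × Int := (e.2.2, e.1, e.2.1)

-- the simulation invariant tying A's loop state to B's
def pvInv (C : List (Int × Int × Int)) (process clen : Int)
    (waitsA : List (Int × Int × Int)) (events : List (Int × Int × Int))
    (waitsB : List (Int × Int)) : Prop :=
  clen = (events.length : Int)
  ∧ (C.filter (fun c => decide (process ≤ c.2.1))).Perm (events.map pvFlip)
  ∧ events.Pairwise (fun a b => a.1 ≤ b.1)
  ∧ (∀ e ∈ events, process ≤ e.1)
  ∧ waitsA.map pvKeyA = waitsB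
  ∧ waitsB.Pairwise (fun a b => pvLt b a)
  ∧ (waitsB.map (fun w => w.2) ++ events.map (fun e => e.2.2)).Nodup

-- fuel needed by A's loop from a given B-state
def pvNeed (events : List (Int × Int × Int)) (waits : List (Int × Int)) (process : Int) : Nat :=
  events.length + waits.length +
    (((events.getLast?.map (fun e => e.1)).getD (process - 1)) + 1 - process).toNat

-- ---- facts about the lexicographic order on (grade, index) pairs ----

theorem pvGtB_eq_true {a b : Int × Int} (h : pvGtB a b = true) : pvLt b a := by
  simp [pvGtB] at h; unfold pvLt; omega

theorem pvGtB_eq_false {a b : Int × Int} (h : pvGtB a b = false) : pvLe a b := by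
  simp [pvGtB] at h; unfold pvLe; omega

theorem pvLt_trans {a b c : Int × Int} (h1 : pvLt a b) (h2 : pvLt b c) : pvLt a c := by
  unfold pvLt at *; omega

theorem pvLt_of_pvLe {a b : Int × Int} (h : pvLe a b) (hne : a.2 ≠ b.2) : pvLt a b := by
  unfold pvLe at h; unfold pvLt; omega

-- ---- the insertion scan pvIns ----

theorem pvIns_perm (x : Int × Int) : ∀ w, (pvIns x w).Perm (x :: w)
  | [] => .refl _
  | a :: as => by
    simp only [pvIns]; split
    · exact ((pvIns_perm x as).cons a).trans (List.Perm.swap x a as)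
    · exact .refl _

theorem pvIns_pairwise {x : Int × Int} : ∀ {w}, w.Pairwise (fun a b => pvLt b a) →
    (∀ y ∈ w, y.2 ≠ x.2) → (pvIns x w).Pairwise (fun a b => pvLt b a) := by
  intro w; induction w with
  | nil => intro _ _; simp [pvIns]
  | cons a as ih =>
    intro hw hx
    cases hw with | cons h1 h2 =>
    simp only [pvIns]; split
    · rename_i hgt
      refine List.Pairwise.cons ?_ (ih h2 (fun y hy => hx y (List.mem_cons_of_mem a hy)))
      intro z hz
      rcases List.mem_cons.mp ((pvIns_perm x as).mem_iff.mp hz) with hz' | hz'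
      · rw [hz']; exact pvGtB_eq_true hgt
      · exact h1 z hz'
    · rename_i hgt
      have hax : pvLt a x :=
        pvLt_of_pvLe (pvGtB_eq_false (Bool.eq_false_iff.mpr hgt))
          (hx a (List.mem_cons_self))
      refine List.Pairwise.cons ?_ (List.Pairwise.cons h1 h2)
      intro z hz
      rcases List.mem_cons.mp hz with hz' | hz'
      · rw [hz']; exact hax
      · exact pvLt_trans (h1 z hz') hax

theorem pvFoldIns_perm : ∀ (arr : List (Int × Int × Int)) (w : List (Int × Int)),
    (arr.foldl (fun w e => pvIns (e.2.1, e.2.2) w) w).Perm (w ++ arr.map pvKeyE)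
  | [], w => by simp
  | a :: as, w => by
    simp only [List.foldl_cons, List.map_cons]
    exact (pvFoldIns_perm as _).trans
      ((((pvIns_perm (a.2.1, a.2.2) w).append_right _).trans List.perm_middle.symm))

theorem pvFoldIns_pairwise : ∀ (arr : List (Int × Int × Int)) (w : List (Int × Int)),
    w.Pairwise (fun a b => pvLt b a) →
    (w.map (fun y => y.2) ++ arr.map (fun e => e.2.2)).Nodup →
    (arr.foldl (fun w e => pvIns (e.2.1, e.2.2) w) w).Pairwise (fun a b => pvLt b a)
  | [], w, hw, _ => hw
  | a :: as, w, hw, hnd => by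
    simp only [List.foldl_cons]
    have hmp : ((pvIns (a.2.1, a.2.2) w).map (fun y => y.2)).Perm
        (a.2.2 :: w.map (fun y => y.2)) := by
      simpa using (pvIns_perm (a.2.1, a.2.2) w).map (fun y => y.2)
    have hperm : ((pvIns (a.2.1, a.2.2) w).map (fun y => y.2) ++ as.map (fun e => e.2.2)).Perm
        (w.map (fun y => y.2) ++ a.2.2 :: as.map (fun e => e.2.2)) :=
      (hmp.append_right _).trans List.perm_middle.symm
    apply pvFoldIns_pairwise as _
    · apply pvIns_pairwise hw
      intro y hy
      rcases List.nodup_append.mp hnd with ⟨_, _, hdis⟩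
      intro he
      exact hdis _ (List.mem_map.mpr ⟨y, hy, rfl⟩) a.2.2 (by simp) he
    · exact List.Perm.nodup hperm.symm (by simpa using hnd)

-- ---- PySem.List.sorted2 with reverse=True yields a (grade, idx)-descending list ----

theorem pvInsertBy_pairwise {α : Type} (c : α → α → Bool) (R : α → α → Prop)
    (htr : ∀ {a b d : α}, R a b → R b d → R a d)
    (hT : ∀ a b, c a b = true → R a b) (hF : ∀ a b, c a b = false → R b a) :
    ∀ (x : α) (l : List α), l.Pairwise R → (PySem.List.insertBy c x l).Pairwise R := by
  intro x l
  induction l with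
  | nil => intro _; exact List.pairwise_singleton R x
  | cons y ys ih =>
    intro hl
    cases hl with | cons h1 h2 =>
    rw [show PySem.List.insertBy c x (y :: ys)
        = if c x y then x :: y :: ys else y :: PySem.List.insertBy c x ys from rfl]
    split
    · rename_i hc
      refine List.Pairwise.cons ?_ (List.Pairwise.cons h1 h2)
      intro z hz
      rcases List.mem_cons.mp hz with hz' | hz'
      · rw [hz']; exact hT x y hc
      · exact htr (hT x y hc) (h1 z hz')
    · rename_i hc
      refine List.Pairwise.cons ?_ (ih h2)
      intro z hz
      rcases (PySem.List.mem_insertBy c x z ys).mp hz with hz' | hz'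
      · rw [hz']; exact hF x y (Bool.eq_false_iff.mpr hc)
      · exact h1 z hz'

theorem pvFoldlInsertBy_pairwise {α : Type} (c : α → α → Bool) (R : α → α → Prop)
    (htr : ∀ {a b d : α}, R a b → R b d → R a d)
    (hT : ∀ a b, c a b = true → R a b) (hF : ∀ a b, c a b = false → R b a) :
    ∀ (l : List α) (acc : List α), acc.Pairwise R →
      (l.foldl (fun acc x => PySem.List.insertBy c x acc) acc).Pairwise R
  | [], acc, h => h
  | x :: xs, acc, h => by
    simp only [List.foldl_cons]
    exact pvFoldlInsertBy_pairwise c R htr hT hF xs _ (pvInsertBy_pairwise c R htr hT hF x acc h)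

theorem pvSorted2_pairwise (xs : List (Int × Int × Int)) :
    (PySem.List.sorted2 xs (fun c => c.2.2) (fun c => c.1) true).Pairwise
      (fun a b => pvLe (pvKeyA b) (pvKeyA a)) := by
  refine pvFoldlInsertBy_pairwise _ _ ?_ ?_ ?_ xs [] List.Pairwise.nil
  · intro a b d h1 h2; unfold pvLe pvKeyA at *; omega
  · intro a b h; simp at h; unfold pvLe pvKeyA; omega
  · intro a b h; simp at h; unfold pvLe pvKeyA; omega

theorem pvDescUnique {l₁ l₂ : List (Int × Int)} (hp : l₁.Perm l₂)
    (h₁ : l₁.Pairwise fun a b => pvLt b a) (h₂ : l₂.Pairwise fun a b => pvLt b a) : l₁ = l₂ :=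
  List.Perm.eq_of_pairwise (fun a b _ _ hab hba => by exfalso; unfold pvLt at *; omega) h₁ h₂ hp

theorem pvStrict {l : List (Int × Int)} (h : l.Pairwise fun a b => pvLe b a)
    (hnd : (l.map (fun y => y.2)).Nodup) : l.Pairwise fun a b => pvLt b a := by
  have h2 : l.Pairwise (fun a b => a.2 ≠ b.2) := List.pairwise_map.mp hnd
  exact (h.and h2).imp (fun {a b} hh => by
    have := hh.1; have := hh.2; unfold pvLe at *; unfold pvLt; omega)

-- ---- A's re-sort of waits equals B's insertion-maintained waits ----

theorem pvServeWaits {waitsA : List (Int × Int × Int)} {filtered : List (Int × Int × Int)}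
    {waitsB : List (Int × Int)} {arr : List (Int × Int × Int)}
    (hmapW : waitsA.map pvKeyA = waitsB)
    (hfp : filtered.Perm (arr.map pvFlip))
    (hwp : waitsB.Pairwise (fun a b => pvLt b a))
    (hnd : (waitsB.map (fun w => w.2) ++ arr.map (fun e => e.2.2)).Nodup) :
    (PySem.List.sorted2 (waitsA ++ filtered) (fun c => c.2.2) (fun c => c.1) true).map pvKeyA
      = arr.foldl (fun w e => pvIns (e.2.1, e.2.2) w) waitsB := by
  have hKAE : ∀ e, pvKeyA (pvFlip e) = pvKeyE e := fun e => rfl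
  have hLperm : ((PySem.List.sorted2 (waitsA ++ filtered) (fun c => c.2.2) (fun c => c.1) true).map pvKeyA).Perm
      (waitsB ++ arr.map pvKeyE) := by
    have h1 := (PySem.List.sorted2_perm (waitsA ++ filtered) (fun c => c.2.2) (fun c => c.1) true).map pvKeyA
    rw [List.map_append, hmapW] at h1
    refine h1.trans (List.Perm.append_left _ ?_)
    have := hfp.map pvKeyA
    rw [List.map_map] at this
    simpa [Function.comp, hKAE] using this
  have hRperm := pvFoldIns_perm arr waitsB
  have hndL : (((PySem.List.sorted2 (waitsA ++ filtered) (fun c => c.2.2) (fun c => c.1) true).map pvKeyA).map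
      (fun y => y.2)).Nodup := by
    refine List.Perm.nodup ?_ hnd
    refine List.Perm.symm ?_
    refine (hLperm.map (fun y => y.2)).trans ?_
    rw [List.map_append, List.map_map]
    refine List.Perm.append_left _ ?_
    have hc : ((fun (y : Int × Int) => y.2) ∘ pvKeyE) = fun (e : Int × Int × Int) => e.2.2 := rfl
    rw [hc]
  have hLpw : ((PySem.List.sorted2 (waitsA ++ filtered) (fun c => c.2.2) (fun c => c.1) true).map pvKeyA).Pairwise
      (fun a b => pvLt b a) := by
    refine pvStrict ?_ hndL
    exact List.pairwise_map.mpr (pvSorted2_pairwise (waitsA ++ filtered))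
  have hRpw : (arr.foldl (fun w e => pvIns (e.2.1, e.2.2) w) waitsB).Pairwise (fun a b => pvLt b a) :=
    pvFoldIns_pairwise arr waitsB hwp hnd
  exact pvDescUnique (hLperm.trans hRperm.symm) hLpw hRpw

-- ---- takeWhile / dropWhile on the time-sorted pending events ----

theorem pvTake_eq_filter (p : Int) : ∀ (ev : List (Int × Int × Int)),
    ev.Pairwise (fun a b => a.1 ≤ b.1) → (∀ e ∈ ev, p ≤ e.1) →
    ev.takeWhile (fun e => decide (e.1 ≤ p)) = ev.filter (fun e => e.1 == p)
  | [], _, _ => rfl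
  | e :: es, hpw, hall => by
    cases hpw with | cons h1 h2 =>
    by_cases he : e.1 ≤ p
    · have hep : e.1 = p := le_antisymm he (hall e List.mem_cons_self)
      rw [List.takeWhile_cons, List.filter_cons]
      simp only [hep, decide_true, le_refl, if_pos, beq_self_eq_true]
      rw [pvTake_eq_filter p es h2 (fun b hb => hall b (List.mem_cons_of_mem e hb))]
    · rw [List.takeWhile_cons]
      simp only [he, decide_false, if_neg, Bool.false_eq_true, not_false_eq_true]
      symm
      rw [List.filter_eq_nil_iff]
      intro b hb
      rcases List.mem_cons.mp hb with hb' | hb'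
      · subst hb'; simp; omega
      · have := h1 b hb'; simp; omega

theorem pvDrop_eq_filter (p : Int) : ∀ (ev : List (Int × Int × Int)),
    ev.Pairwise (fun a b => a.1 ≤ b.1) → (∀ e ∈ ev, p ≤ e.1) →
    ev.dropWhile (fun e => decide (e.1 ≤ p)) = ev.filter (fun e => decide (p < e.1))
  | [], _, _ => rfl
  | e :: es, hpw, hall => by
    cases hpw with | cons h1 h2 =>
    by_cases he : e.1 ≤ p
    · rw [List.dropWhile_cons, List.filter_cons]
      simp only [he, decide_true, if_pos]
      have : ¬ (p < e.1) := by omega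
      simp only [this, decide_false, Bool.false_eq_true, if_neg, not_false_eq_true]
      exact pvDrop_eq_filter p es h2 (fun b hb => hall b (List.mem_cons_of_mem e hb))
    · rw [List.dropWhile_cons]
      simp only [he, decide_false, if_neg, Bool.false_eq_true, not_false_eq_true]
      symm
      rw [List.filter_eq_self]
      intro b hb
      rcases List.mem_cons.mp hb with hb' | hb'
      · subst hb'; simp; omega
      · have := h1 b hb'; simp; omega

-- ---- evaluating pvJump and unfolding pvBLoop ----

theorem pvJump_serve {waitsB : List (Int × Int)} {ev : List (Int × Int × Int)} {p : Int}
    (h : waitsB ≠ [] ∨ ∀ e ∈ ev.head?, e.1 ≤ p) : pvJump waitsB ev p = p := by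
  rcases waitsB with _ | ⟨w, ws⟩
  · rcases ev with _ | ⟨e, es⟩
    · rfl
    · rcases h with h | h
      · exact absurd rfl h
      · have he := h e (by simp)
        simp only [pvJump]
        split <;> omega
  · rfl

theorem pvJump_jump {ev : List (Int × Int × Int)} {e : Int × Int × Int} {es : List (Int × Int × Int)}
    {p : Int} (hev : ev = e :: es) (h : p ≤ e.1) : pvJump [] ev p = e.1 := by
  subst hev; simp only [pvJump]; split <;> omega

-- ---- one-step unfolding of the two loops ----

theorem pvALoop_step_serve (f : Nat) (C : List (Int × Int × Int)) (clen : Int)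
    (waitsA : List (Int × Int × Int)) (p : Int) (ans : List Int)
    (hcond : waitsA ≠ [] ∨ clen ≠ 0) {cA : Int × Int × Int}
    (hlast : (PySem.List.sorted2 (waitsA ++ C.filter (fun c => c.2.1 == p)) (fun c => c.2.2) (fun c => c.1) true).getLast? = some cA) :
    pvALoop (f + 1) C clen waitsA p ans
      = pvALoop f C (clen - (C.filter (fun c => c.2.1 == p)).length)
          (PySem.List.sorted2 (waitsA ++ C.filter (fun c => c.2.1 == p)) (fun c => c.2.2) (fun c => c.1) true).dropLast
          (p + 1) (ans ++ [cA.1]) := by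
  conv_lhs => rw [pvALoop]
  rw [if_pos hcond]
  simp only [hlast]

theorem pvALoop_step_idle (f : Nat) (C : List (Int × Int × Int)) (clen : Int)
    (waitsA : List (Int × Int × Int)) (p : Int) (ans : List Int)
    (hcond : waitsA ≠ [] ∨ clen ≠ 0)
    (hlast : (PySem.List.sorted2 (waitsA ++ C.filter (fun c => c.2.1 == p)) (fun c => c.2.2) (fun c => c.1) true).getLast? = none) :
    pvALoop (f + 1) C clen waitsA p ans
      = pvALoop f C (clen - (C.filter (fun c => c.2.1 == p)).length)
          (PySem.List.sorted2 (waitsA ++ C.filter (fun c => c.2.1 == p)) (fun c => c.2.2) (fun c => c.1) true)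
          (p + 1) ans := by
  conv_lhs => rw [pvALoop]
  rw [if_pos hcond]
  simp only [hlast]

theorem pvBLoop_step (ev : List (Int × Int × Int)) (wB : List (Int × Int)) (time : Int) (ans : List Int)
    (hne : ¬(ev = [] ∧ wB = []))
    (hjmp : pvJump wB ev time = time)
    (hB1 : (ev.takeWhile (fun e => decide (e.1 ≤ time))).foldl (fun w e => pvIns (e.2.1, e.2.2) w) wB ≠ []) :
    pvBLoop ev wB time ans
      = pvBLoop (ev.dropWhile (fun e => decide (e.1 ≤ time)))
          ((ev.takeWhile (fun e => decide (e.1 ≤ time))).foldl (fun w e => pvIns (e.2.1, e.2.2) w) wB).dropLast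
          (time + 1)
          (ans ++ [(((ev.takeWhile (fun e => decide (e.1 ≤ time))).foldl (fun w e => pvIns (e.2.1, e.2.2) w) wB).getLast hB1).2]) := by
  conv_lhs => rw [pvBLoop]
  rw [if_neg hne]
  simp only [hjmp]
  rw [dif_neg hB1]

theorem pvBLoop_shift {e : Int × Int × Int} {es : List (Int × Int × Int)} {time : Int} {ans : List Int}
    (h : time < e.1) : pvBLoop (e :: es) [] time ans = pvBLoop (e :: es) [] (time + 1) ans := by
  conv_lhs => rw [pvBLoop]
  conv_rhs => rw [pvBLoop]
  rw [pvJump_jump rfl (by omega : time ≤ e.1), pvJump_jump rfl (by omega : time + 1 ≤ e.1)]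

theorem pvBLoop_nil (time : Int) (ans : List Int) : pvBLoop [] [] time ans = ans := by
  rw [pvBLoop]; simp

-- ---- the per-tick filter of A, read through the invariant ----

theorem pvFiltered_perm {C ev : List (Int × Int × Int)} {p : Int}
    (hperm : (C.filter (fun c => decide (p ≤ c.2.1))).Perm (ev.map pvFlip)) :
    (C.filter (fun c => c.2.1 == p)).Perm ((ev.filter (fun e => e.1 == p)).map pvFlip) := by
  have h1 : C.filter (fun c => c.2.1 == p)
      = (C.filter (fun c => decide (p ≤ c.2.1))).filter (fun c => c.2.1 == p) := by
    rw [List.filter_filter]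
    apply List.filter_congr
    intro x _
    rcases eq_or_ne x.2.1 p with h | h
    · simp [h]
    · simp [h]
  rw [h1]
  have h2 := hperm.filter (fun c => c.2.1 == p)
  rw [List.filter_map] at h2
  exact h2

theorem pvStepPerm {C ev : List (Int × Int × Int)} {p : Int}
    (hperm : (C.filter (fun c => decide (p ≤ c.2.1))).Perm (ev.map pvFlip)) :
    (C.filter (fun c => decide (p + 1 ≤ c.2.1))).Perm ((ev.filter (fun e => decide (p < e.1))).map pvFlip) := by
  have h1 : C.filter (fun c => decide (p + 1 ≤ c.2.1))
      = (C.filter (fun c => decide (p ≤ c.2.1))).filter (fun c => decide (p < c.2.1)) := by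
    rw [List.filter_filter]
    apply List.filter_congr
    intro x _
    rcases lt_or_ge p x.2.1 with h | h
    · simp [show p + 1 ≤ x.2.1 by omega, show p ≤ x.2.1 by omega, h]
    · simp [show ¬ (p + 1 ≤ x.2.1) by omega, show ¬ (p < x.2.1) by omega]
  rw [h1]
  have h2 := hperm.filter (fun c => decide (p < c.2.1))
  rw [List.filter_map] at h2
  exact h2

theorem pvSorted2_nil :
    PySem.List.sorted2 ([] : List (Int × Int × Int)) (fun c => c.2.2) (fun c => c.1) true = [] := rfl

theorem pvSim : ∀ (fuel : Nat) (C : List (Int × Int × Int)) (clen : Int)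
    (waitsA : List (Int × Int × Int)) (process : Int) (ans : List Int)
    (events : List (Int × Int × Int)) (waitsB : List (Int × Int)),
    pvInv C process clen waitsA events waitsB →
    pvNeed events waitsB process ≤ fuel →
    pvALoop fuel C clen waitsA process ans = pvBLoop events waitsB process ans := by
  intro fuel
  induction fuel with
  | zero =>
    intro C clen waitsA p ans ev wB hinv hf
    obtain ⟨hclen, hperm, hpw, hall, hmap, hwpw, hnd⟩ := hinv
    have hev : ev = [] := by
      unfold pvNeed at hf
      exact List.length_eq_zero_iff.mp (by omega)
    have hwB : wB = [] := by
      unfold pvNeed at hf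
      exact List.length_eq_zero_iff.mp (by omega)
    subst hev; subst hwB
    rw [pvBLoop_nil]
    rfl
  | succ f ih =>
    intro C clen waitsA p ans ev wB hinv hf
    obtain ⟨hclen, hperm, hpw, hall, hmap, hwpw, hnd⟩ := hinv
    by_cases hterm : ev = [] ∧ wB = []
    · obtain ⟨hev, hwB⟩ := hterm
      subst hev; subst hwB
      have hwa : waitsA = [] := List.map_eq_nil_iff.mp hmap
      have hclen0 : clen = 0 := by simpa using hclen
      rw [pvBLoop_nil, pvALoop, if_neg (by simp [hwa, hclen0])]
    · -- non-terminal state: one serving step, or one idle tick of A absorbed by B's gap skip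
      have hserve : (wB ≠ [] ∨ ∃ e' es', ev = e' :: es' ∧ e'.1 ≤ p) →
          pvALoop (f + 1) C clen waitsA p ans = pvBLoop ev wB p ans := by
        intro hdisj
        have htime : pvJump wB ev p = p := by
          apply pvJump_serve
          rcases hdisj with h | ⟨e, es, hev, he⟩
          · exact Or.inl h
          · subst hev
            refine Or.inr ?_
            intro x hx
            have hx' : e = x := by simpa using hx
            rw [← hx']; exact he
        set arr := ev.takeWhile (fun e => decide (e.1 ≤ p)) with harr
        set rest := ev.dropWhile (fun e => decide (e.1 ≤ p)) with hdrop
        have htake : arr = ev.filter (fun e => e.1 == p) := pvTake_eq_filter p ev hpw hall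
        have hdropf : rest = ev.filter (fun e => decide (p < e.1)) := pvDrop_eq_filter p ev hpw hall
        have hfp : (C.filter (fun c => c.2.1 == p)).Perm (arr.map pvFlip) := by
          rw [htake]; exact pvFiltered_perm hperm
        have hndA : ((wB.map (fun w => w.2)) ++ arr.map (fun e => e.2.2)).Nodup :=
          List.Nodup.sublist (((List.takeWhile_sublist _).map _).append_left _) hnd
        have hkey := pvServeWaits hmap hfp hwpw hndA
        have hpw1 := pvFoldIns_pairwise arr wB hwpw hndA
        have hlen1 := pvFoldIns_length arr wB
        set wB1 := arr.foldl (fun w e => pvIns (e.2.1, e.2.2) w) wB with hwB1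
        have hsplit : arr.length + rest.length = ev.length := by
          rw [harr, hdrop, ← List.length_append, List.takeWhile_append_dropWhile]
        have hB1ne : wB1 ≠ [] := by
          intro hnil
          have hlen0 : wB1.length = 0 := by rw [hnil]; rfl
          rw [hlen1] at hlen0
          rcases hdisj with h | ⟨e, es, hev, he⟩
          · exact h (List.length_eq_zero_iff.mp (by omega))
          · have harr1 : arr = e :: es.takeWhile (fun e => decide (e.1 ≤ p)) := by
              rw [harr, hev, List.takeWhile_cons, if_pos (by simpa using he)]
            rw [harr1] at hlen0
            simp at hlen0
        have hglA : ∃ cA, (PySem.List.sorted2 (waitsA ++ C.filter (fun c => c.2.1 == p)) (fun c => c.2.2) (fun c => c.1) true).getLast? = some cA ∧ pvKeyA cA = wB1.getLast hB1ne := by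
          have h1 : ((PySem.List.sorted2 (waitsA ++ C.filter (fun c => c.2.1 == p)) (fun c => c.2.2) (fun c => c.1) true).map pvKeyA).getLast? = some (wB1.getLast hB1ne) := by
            rw [hkey, List.getLast?_eq_some_getLast hB1ne]
          rw [List.getLast?_map] at h1
          cases h2 : (PySem.List.sorted2 (waitsA ++ C.filter (fun c => c.2.1 == p)) (fun c => c.2.2) (fun c => c.1) true).getLast? with
          | none => rw [h2] at h1; simp at h1
          | some c => rw [h2] at h1; exact ⟨c, rfl, by simpa using h1⟩
        obtain ⟨cA, hcA, hcAk⟩ := hglA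
        have hcond : waitsA ≠ [] ∨ clen ≠ 0 := by
          rcases hdisj with h | ⟨e, es, hev, he⟩
          · left; intro hA; apply h; rw [← hmap, hA]; rfl
          · right; rw [hclen, hev]; simp only [List.length_cons]; push_cast; omega
        rw [pvALoop_step_serve f C clen waitsA p ans hcond hcA]
        rw [pvBLoop_step ev wB p ans hterm htime hB1ne]
        have hansa : ((List.foldl (fun w e => pvIns (e.2.1, e.2.2) w) wB (List.takeWhile (fun e => decide (e.1 ≤ p)) ev)).getLast hB1ne).2 = cA.1 := by
          rw [show ((List.foldl (fun w e => pvIns (e.2.1, e.2.2) w) wB (List.takeWhile (fun e => decide (e.1 ≤ p)) ev)).getLast hB1ne) = pvKeyA cA from hcAk.symm]; rfl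
        rw [hansa]
        have hflen : (C.filter (fun c => c.2.1 == p)).length = arr.length := by
          have := hfp.length_eq; simpa using this
        apply ih
        · refine ⟨?_, ?_, ?_, ?_, ?_, ?_, ?_⟩
          · rw [hclen, hflen, ← hdrop]; omega
          · rw [← hdrop, hdropf]; exact pvStepPerm hperm
          · exact List.Pairwise.sublist (List.dropWhile_suffix _).sublist hpw
          · intro b hb
            have hb' : b ∈ rest := hb
            rw [hdropf] at hb'
            have := List.of_mem_filter hb'
            simp at this; omega
          · rw [List.map_dropLast, hkey, hwB1]
          · exact List.Pairwise.sublist (List.dropLast_sublist _) hpw1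
          · have hs1 : (wB1.dropLast.map (fun y => y.2) ++ rest.map (fun e => e.2.2)).Sublist
                (wB1.map (fun y => y.2) ++ rest.map (fun e => e.2.2)) :=
              ((List.dropLast_sublist wB1).map _).append_right _
            have hp2 : (wB1.map (fun y => y.2) ++ rest.map (fun e => e.2.2)).Perm
                (wB.map (fun y => y.2) ++ ev.map (fun e => e.2.2)) := by
              have h1 := (pvFoldIns_perm arr wB).map (fun y => y.2)
              rw [List.map_append, List.map_map] at h1
              have hc : ((fun (y : Int × Int) => y.2) ∘ pvKeyE) = fun (e : Int × Int × Int) => e.2.2 := rfl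
              rw [hc] at h1
              rw [← hwB1] at h1
              refine (h1.append_right _).trans ?_
              rw [List.append_assoc, ← List.map_append]
              rw [show arr ++ rest = ev from by rw [harr, hdrop]; exact List.takeWhile_append_dropWhile]
            exact List.Nodup.sublist hs1 (List.Perm.nodup hp2.symm hnd)
        · show pvNeed rest wB1.dropLast (p + 1) ≤ f
          unfold pvNeed at hf ⊢
          rw [List.length_dropLast, hlen1]
          have hpos : 1 ≤ ev.length + wB.length := by
            rcases not_and_or.mp hterm with h | h
            · have : ev.length ≠ 0 := fun hh => h (List.length_eq_zero_iff.mp hh)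
              omega
            · have : wB.length ≠ 0 := fun hh => h (List.length_eq_zero_iff.mp hh)
              omega
          have hB1pos : wB1.length ≠ 0 := fun hh => hB1ne (List.length_eq_zero_iff.mp hh)
          rw [hlen1] at hB1pos
          cases hr : rest.getLast? with
          | none =>
            simp only [Option.map_none, Option.getD_none]
            omega
          | some lr =>
            have hevl : ev.getLast? = some lr := by
              have h5 : arr ++ rest = ev := by
                rw [harr, hdrop]; exact List.takeWhile_append_dropWhile
              rw [← h5, List.getLast?_append, hr]; rfl
            rw [hevl] at hf
            simp only [Option.map_some, Option.getD_some] at hf ⊢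
            omega
      by_cases hwB : wB = []
      · have hevne : ev ≠ [] := fun h => hterm ⟨h, hwB⟩
        obtain ⟨e, es, hev⟩ : ∃ e es, ev = e :: es := by
          cases ev with
          | nil => exact absurd rfl hevne
          | cons a as => exact ⟨a, as, rfl⟩
        have hhead : ∀ b ∈ ev, e.1 ≤ b.1 := by
          subst hev
          intro b hb
          rcases List.mem_cons.mp hb with h | h
          · rw [h]
          · exact (List.pairwise_cons.mp hpw).1 b h
        by_cases hpe : p < e.1
        · -- JUMP: A ticks once with nothing to do; B's entry time is irrelevant below e.1
          subst hev; subst hwB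
          have hwa : waitsA = [] := List.map_eq_nil_iff.mp hmap
          have hfe : (e :: es).filter (fun x => x.1 == p) = [] := by
            rw [List.filter_eq_nil_iff]
            intro b hb
            have := hhead b hb
            simp; omega
          have hfC : C.filter (fun c => c.2.1 == p) = [] := by
            have h3 := pvFiltered_perm hperm
            rw [hfe] at h3
            simpa using h3
          have hlastnone : (PySem.List.sorted2 (waitsA ++ C.filter (fun c => c.2.1 == p)) (fun c => c.2.2) (fun c => c.1) true).getLast? = none := by
            rw [hwa, hfC]; rfl
          have hcond : waitsA ≠ [] ∨ clen ≠ 0 := by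
            right; rw [hclen]; simp only [List.length_cons]; push_cast; omega
          rw [pvALoop_step_idle f C clen waitsA p ans hcond hlastnone]
          rw [hwa, hfC, pvBLoop_shift hpe]
          simp only [List.length_nil, Int.natCast_zero, sub_zero, List.append_nil, pvSorted2_nil]
          apply ih
          · refine ⟨hclen, ?_, hpw, ?_, rfl, List.Pairwise.nil, hnd⟩
            · have h4 := pvStepPerm (ev := e :: es) hperm
              rw [show (e :: es).filter (fun x => decide (p < x.1)) = e :: es from
                List.filter_eq_self.mpr (by intro b hb; have := hhead b hb; simp; omega)] at h4
              exact h4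
            · intro b hb
              have := hhead b hb
              omega
          · unfold pvNeed at hf ⊢
            cases hl : (e :: es).getLast? with
            | none => rw [List.getLast?_eq_none_iff] at hl; simp at hl
            | some lr =>
              have hmem := List.mem_of_getLast? hl
              have hlr := hhead lr hmem
              rw [hl] at hf
              simp only [Option.map_some, Option.getD_some] at hf ⊢
              omega
        · exact hserve (Or.inr ⟨e, es, hev, by omega⟩)
      · exact hserve (Or.inl hwB)

-- ---- the initial state satisfies the invariant ----

theorem pvEnum_eq_map_flip : ∀ (k : Int) (l : List (Int × Int)),
    pvEnum k l = (pvMkEvents k l).map pvFlip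
  | _, [] => rfl
  | k, (tm, g) :: rest => by
    simp only [pvEnum, pvMkEvents, List.map_cons]
    rw [pvEnum_eq_map_flip (k + 1) rest]
    rfl

theorem pvMkEvents_length : ∀ (k : Int) (l : List (Int × Int)),
    (pvMkEvents k l).length = l.length
  | _, [] => rfl
  | k, (tm, g) :: rest => by
    simp only [pvMkEvents, List.length_cons, pvMkEvents_length (k + 1) rest]

theorem pvMkEvents_mem : ∀ (k : Int) (l : List (Int × Int)) (e : Int × Int × Int),
    e ∈ pvMkEvents k l → (e.1, e.2.1) ∈ l ∧ k ≤ e.2.2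
  | k, [], e => by simp [pvMkEvents]
  | k, (tm, g) :: rest, e => by
    intro he
    rcases List.mem_cons.mp he with h | h
    · rw [h]; exact ⟨List.mem_cons_self, le_refl _⟩
    · obtain ⟨h1, h2⟩ := pvMkEvents_mem (k + 1) rest e h
      exact ⟨List.mem_cons_of_mem _ h1, by omega⟩

theorem pvMkEvents_pairwise_idx : ∀ (k : Int) (l : List (Int × Int)),
    (pvMkEvents k l).Pairwise (fun a b => a.2.2 < b.2.2)
  | k, [] => List.Pairwise.nil
  | k, (tm, g) :: rest => by
    refine List.Pairwise.cons ?_ (pvMkEvents_pairwise_idx (k + 1) rest)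
    intro b hb
    have := (pvMkEvents_mem (k + 1) rest b hb).2
    simp only []
    omega

-- ===== VERDICT (by name: the statement is the Claim_ definition above) =====
theorem solution_spec : Claim_equal_solution := by
  intro t r _ hpre
  obtain ⟨hle, hpos⟩ := hpre
  show solution t r = solution_alt t r
  simp only [solution, solution_alt]
  have hEperm := PySem.List.sorted_perm (pvMkEvents 0 (t.zip r)) (fun e => e.1) false
  have hlenE : (PySem.List.sorted (pvMkEvents 0 (t.zip r)) (fun e => e.1) false).length = t.length := by
    rw [PySem.List.length_sorted, pvMkEvents_length, List.length_zip]
    omega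
  have hmemt : ∀ e ∈ PySem.List.sorted (pvMkEvents 0 (t.zip r)) (fun e => e.1) false, e.1 ∈ t := by
    intro e he
    have h1 := (PySem.List.mem_sorted _ _ _ _).mp he
    have h2 := (pvMkEvents_mem 0 _ e h1).1
    exact (List.of_mem_zip h2).1
  apply pvSim
  · refine ⟨?_, ?_, ?_, ?_, rfl, List.Pairwise.nil, ?_⟩
    · rw [hlenE]
    · have hCself : (PySem.List.sorted (pvEnum 0 (t.zip r)) (fun c => c.2.1) true).filter
          (fun c => decide ((0 : Int) ≤ c.2.1))
          = PySem.List.sorted (pvEnum 0 (t.zip r)) (fun c => c.2.1) true := by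
        rw [List.filter_eq_self]
        intro c hc
        have h1 := (PySem.List.mem_sorted _ _ _ _).mp hc
        rw [pvEnum_eq_map_flip] at h1
        obtain ⟨e, he, hfe⟩ := List.mem_map.mp h1
        have h2 := (List.of_mem_zip (pvMkEvents_mem 0 _ e he).1).1
        have h3 := hpos _ h2
        rw [← hfe]
        simpa [pvFlip] using h3
      rw [hCself]
      have h4 := (PySem.List.sorted_perm (pvEnum 0 (t.zip r)) (fun c => c.2.1) true).trans
        (List.Perm.of_eq (pvEnum_eq_map_flip 0 (t.zip r)))
      exact h4.trans (hEperm.map pvFlip).symm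
    · exact PySem.List.sorted_pairwise (pvMkEvents 0 (t.zip r)) (fun e => e.1)
    · intro e he
      exact hpos _ (hmemt e he)
    · simp only [List.map_nil, List.nil_append]
      refine List.Perm.nodup ((hEperm.map (fun e => e.2.2)).symm) ?_
      exact List.pairwise_map.mpr ((pvMkEvents_pairwise_idx 0 (t.zip r)).imp (fun h => by omega))
  · unfold pvNeed
    rw [hlenE]
    simp only [List.length_nil]
    have hFmax := PySem.List.le_foldl_max t 0
    cases hl : (PySem.List.sorted (pvMkEvents 0 (t.zip r)) (fun e => e.1) false).getLast? with
    | none =>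
      simp only [Option.map_none, Option.getD_none]
      omega
    | some e =>
      have hmem := List.mem_of_getLast? hl
      have h1 := hFmax.2 e.1 (hmemt e hmem)
      have h2 := hFmax.1
      simp only [Option.map_some, Option.getD_some]
      omega
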